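-- pv_equiv track=rewrite | github.com/lesleslie/mahavishnu | scripts/marketplace/compile_mcp_servers.py | categorize_servers
-- ===== SOURCE A (Python) =====
-- from typing import Any
--
-- def categorize_servers(servers: dict[str, dict[str, Any]]) -> dict[str, list[str]]:
--     """Categorize MCP servers by function."""
--     categories = {
--         "development": [],
--         "git": [],
--         "cloud": [],
--         "database": [],
--         "monitoring": [],
--         "design": [],
--         "testing": [],
--         "ai": [],
--         "automation": [],
--         "custom": [],
--     }
--
--     for name, info in servers.items():
--         # Categorize based on name
--         if name in ["github", "gitlab"]:
--             categories["git"].append(name)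
--         elif name in ["memory", "sequential-thinking", "context7"]:
--             categories["ai"].append(name)
--         elif name in ["cloud-run", "turso-cloud", "upstash"]:
--             categories["cloud"].append(name)
--         elif name in ["sentry", "logfire"]:
--             categories["monitoring"].append(name)
--         elif name in ["excalidraw", "penpot", "mermaid"]:
--             categories["design"].append(name)
--         elif name in ["playwright"]:
--             categories["testing"].append(name)
--         elif name in ["macos_automator", "peekaboo"]:
--             categories["automation"].append(name)
--         elif name in ["rust-filesystem"]:
--             categories["development"].append(name)
--         else:
--             categories["custom"].append(name)
--
--     # Remove empty categories
--     return {k: v for k, v in categories.items() if v}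
-- ===== SOURCE B (Python) =====
-- from typing import Any
--
-- _CATEGORY_MEMBERS = {
--     "development": ("rust-filesystem",),
--     "git": ("github", "gitlab"),
--     "cloud": ("cloud-run", "turso-cloud", "upstash"),
--     "monitoring": ("sentry", "logfire"),
--     "design": ("excalidraw", "penpot", "mermaid"),
--     "testing": ("playwright",),
--     "ai": ("memory", "sequential-thinking", "context7"),
--     "automation": ("macos_automator", "peekaboo"),
-- }
--
-- _CATEGORY_ORDER = (
--     "development", "git", "cloud", "database", "monitoring",
--     "design", "testing", "ai", "automation", "custom",
-- )
--
-- _KNOWN = frozenset(n for ms in _CATEGORY_MEMBERS.values() for n in ms)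
--
--
-- def _belongs(cat: str, name: str) -> bool:
--     if cat == "custom":
--         return name not in _KNOWN
--     return name in _CATEGORY_MEMBERS.get(cat, ())
--
--
-- def categorize_servers(servers: dict[str, dict[str, Any]]) -> dict[str, list[str]]:
--     """Categorize MCP servers by function (one filtering pass per category)."""
--     names = list(servers)
--     buckets = [(cat, [n for n in names if _belongs(cat, n)]) for cat in _CATEGORY_ORDER]
--     return {cat: ns for cat, ns in buckets if ns}
-- ===== Notes on version B (the rewrite author's own statement) =====
-- stated objective: alternative
-- what changed: Inverts the traversal: instead of A's single pass over servers dispatching each name through an eight-way if/elif chain into pre-seeded buckets, B loops over the fixed category list and builds each bucket by filtering the server names against that category's member set (the 'custom' bucket filters against the union of all member sets), then keeps the nonempty buckets.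
import Mathlib
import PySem

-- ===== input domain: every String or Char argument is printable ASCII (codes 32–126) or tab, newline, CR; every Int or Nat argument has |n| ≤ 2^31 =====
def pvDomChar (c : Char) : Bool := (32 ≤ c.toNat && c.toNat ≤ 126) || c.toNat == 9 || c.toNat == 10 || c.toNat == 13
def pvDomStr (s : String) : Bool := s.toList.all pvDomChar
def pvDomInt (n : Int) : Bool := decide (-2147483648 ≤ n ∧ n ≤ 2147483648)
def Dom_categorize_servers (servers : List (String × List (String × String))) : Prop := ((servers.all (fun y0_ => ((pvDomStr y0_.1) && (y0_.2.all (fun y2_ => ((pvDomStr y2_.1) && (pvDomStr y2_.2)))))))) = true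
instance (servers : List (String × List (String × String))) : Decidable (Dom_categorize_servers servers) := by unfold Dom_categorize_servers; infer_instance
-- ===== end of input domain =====

-- B inverts the traversal: one filtering pass over the server names per fixed
-- category (the 'custom' bucket filters against the union of all member lists),
-- instead of A's single pass dispatching each name through an eight-way if/elif
-- chain into pre-seeded buckets; nonempty buckets are kept in category order.

-- ===== PORT A =====
def categorize_servers (servers : List (String × List (String × String))) : List (String × List String) :=
  let categories : PySem.Dict String (List String) := PySem.Dict.mk
    [("development", []), ("git", []), ("cloud", []), ("database", []), ("monitoring", []),
     ("design", []), ("testing", []), ("ai", []), ("automation", []), ("custom", [])]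
  let categories := servers.foldl (fun cats p =>
    let name := p.1
    if ["github", "gitlab"].contains name then
      cats.modify "git" [] (fun v => v ++ [name])
    else if ["memory", "sequential-thinking", "context7"].contains name then
      cats.modify "ai" [] (fun v => v ++ [name])
    else if ["cloud-run", "turso-cloud", "upstash"].contains name then
      cats.modify "cloud" [] (fun v => v ++ [name])
    else if ["sentry", "logfire"].contains name then
      cats.modify "monitoring" [] (fun v => v ++ [name])
    else if ["excalidraw", "penpot", "mermaid"].contains name then
      cats.modify "design" [] (fun v => v ++ [name])
    else if ["playwright"].contains name then
      cats.modify "testing" [] (fun v => v ++ [name])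
    else if ["macos_automator", "peekaboo"].contains name then
      cats.modify "automation" [] (fun v => v ++ [name])
    else if ["rust-filesystem"].contains name then
      cats.modify "development" [] (fun v => v ++ [name])
    else
      cats.modify "custom" [] (fun v => v ++ [name])) categories
  categories.items.filter (fun kv => !kv.2.isEmpty)

-- ===== PORT B =====
def categoryMembers : PySem.Dict String (List String) := PySem.Dict.mk
  [("development", ["rust-filesystem"]),
   ("git", ["github", "gitlab"]),
   ("cloud", ["cloud-run", "turso-cloud", "upstash"]),
   ("monitoring", ["sentry", "logfire"]),
   ("design", ["excalidraw", "penpot", "mermaid"]),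
   ("testing", ["playwright"]),
   ("ai", ["memory", "sequential-thinking", "context7"]),
   ("automation", ["macos_automator", "peekaboo"])]

def categoryOrder : List String :=
  ["development", "git", "cloud", "database", "monitoring",
   "design", "testing", "ai", "automation", "custom"]

def knownNames : PySem.Set String := PySem.Set.ofList categoryMembers.values.flatten

def belongs (cat : String) (name : String) : Bool :=
  if cat == "custom" then !(knownNames.contains name)
  else (categoryMembers.getD cat []).contains name

def categorize_servers_alt (servers : List (String × List (String × String))) : List (String × List String) :=
  let names := servers.map (·.1)
  let buckets := categoryOrder.map (fun cat => (cat, names.filter (fun n => belongs cat n)))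
  buckets.filter (fun kv => !kv.2.isEmpty)

-- ===== PRECONDITION & SPEC =====
def Spec_categorize_servers (servers : List (String × List (String × String))) (out : List (String × List String)) : Prop := out = categorize_servers_alt servers
instance (servers : List (String × List (String × String))) (out : List (String × List String)) : Decidable (Spec_categorize_servers servers out) := by unfold Spec_categorize_servers; infer_instance

-- ===== CLAIM (what is proved, stated in full; the proofs are below) =====
def Claim_equal_categorize_servers : Prop := ∀ (servers : List (String × List (String × String))), Dom_categorize_servers servers → Spec_categorize_servers servers (categorize_servers servers)

-- ===== LEMMAS AND PROOFS =====

-- The key A's branch chain selects, factored out for the proof.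
def chainKey (name : String) : String :=
  if ["github", "gitlab"].contains name then "git"
  else if ["memory", "sequential-thinking", "context7"].contains name then "ai"
  else if ["cloud-run", "turso-cloud", "upstash"].contains name then "cloud"
  else if ["sentry", "logfire"].contains name then "monitoring"
  else if ["excalidraw", "penpot", "mermaid"].contains name then "design"
  else if ["playwright"].contains name then "testing"
  else if ["macos_automator", "peekaboo"].contains name then "automation"
  else if ["rust-filesystem"].contains name then "development"
  else "custom"

-- A's initial dict of empty buckets.
def initCats : PySem.Dict String (List String) := PySem.Dict.mk
  [("development", []), ("git", []), ("cloud", []), ("database", []), ("monitoring", []),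
   ("design", []), ("testing", []), ("ai", []), ("automation", []), ("custom", [])]

-- All seventeen names A's chain recognises, in categoryMembers order.
def knownList : List String :=
  ["rust-filesystem", "github", "gitlab", "cloud-run", "turso-cloud", "upstash",
   "sentry", "logfire", "excalidraw", "penpot", "mermaid", "playwright",
   "memory", "sequential-thinking", "context7", "macos_automator", "peekaboo"]

theorem contains_false_of_ne (n : String) (l : List String) (h : ∀ s ∈ l, ¬ n = s) :
    l.contains n = false := by
  induction l with
  | nil => rfl
  | cons a as ih =>
    simp only [List.contains_cons, Bool.or_eq_false_iff]
    exact ⟨beq_eq_false_iff_ne.mpr (h a (by simp)),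
           ih (fun s hs => h s (by simp [hs]))⟩

theorem chainKey_of_unknown (n : String) (h : ¬ n ∈ knownList) : chainKey n = "custom" := by
  simp only [knownList, List.mem_cons, not_or, List.not_mem_nil] at h
  obtain ⟨h1, h2, h3, h4, h5, h6, h7, h8, h9, h10, h11, h12, h13, h14, h15, h16, h17, -⟩ := h
  unfold chainKey
  rw [contains_false_of_ne n _ (List.forall_mem_cons.mpr ⟨h2, List.forall_mem_cons.mpr ⟨h3, List.forall_mem_nil _⟩⟩),
      contains_false_of_ne n _ (List.forall_mem_cons.mpr ⟨h13, List.forall_mem_cons.mpr ⟨h14, List.forall_mem_cons.mpr ⟨h15, List.forall_mem_nil _⟩⟩⟩),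
      contains_false_of_ne n _ (List.forall_mem_cons.mpr ⟨h4, List.forall_mem_cons.mpr ⟨h5, List.forall_mem_cons.mpr ⟨h6, List.forall_mem_nil _⟩⟩⟩),
      contains_false_of_ne n _ (List.forall_mem_cons.mpr ⟨h7, List.forall_mem_cons.mpr ⟨h8, List.forall_mem_nil _⟩⟩),
      contains_false_of_ne n _ (List.forall_mem_cons.mpr ⟨h9, List.forall_mem_cons.mpr ⟨h10, List.forall_mem_cons.mpr ⟨h11, List.forall_mem_nil _⟩⟩⟩),
      contains_false_of_ne n _ (List.forall_mem_cons.mpr ⟨h12, List.forall_mem_nil _⟩),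
      contains_false_of_ne n _ (List.forall_mem_cons.mpr ⟨h16, List.forall_mem_cons.mpr ⟨h17, List.forall_mem_nil _⟩⟩),
      contains_false_of_ne n _ (List.forall_mem_cons.mpr ⟨h1, List.forall_mem_nil _⟩)]
  rfl

-- A's chain agrees with B's per-category membership test on every category key.
theorem chainKey_eq_belongs (k : String) (hk : k ∈ categoryOrder) (n : String) :
    (chainKey n == k) = belongs k n := by
  by_cases h : n ∈ knownList
  · have known_case : ∀ m ∈ knownList, ∀ k ∈ categoryOrder, (chainKey m == k) = belongs k m := by decide
    simp only [knownList, List.mem_cons, List.not_mem_nil, or_false] at h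
    rcases h with rfl|rfl|rfl|rfl|rfl|rfl|rfl|rfl|rfl|rfl|rfl|rfl|rfl|rfl|rfl|rfl|rfl <;>
      exact known_case _ (by decide) k hk
  · rw [chainKey_of_unknown n h]
    simp only [knownList, List.mem_cons, not_or, List.not_mem_nil] at h
    obtain ⟨h1, h2, h3, h4, h5, h6, h7, h8, h9, h10, h11, h12, h13, h14, h15, h16, h17, -⟩ := h
    have hknown : knownList.contains n = false :=
      contains_false_of_ne n _ (List.forall_mem_cons.mpr ⟨h1, List.forall_mem_cons.mpr ⟨h2, List.forall_mem_cons.mpr ⟨h3, List.forall_mem_cons.mpr ⟨h4, List.forall_mem_cons.mpr ⟨h5, List.forall_mem_cons.mpr ⟨h6, List.forall_mem_cons.mpr ⟨h7, List.forall_mem_cons.mpr ⟨h8, List.forall_mem_cons.mpr ⟨h9, List.forall_mem_cons.mpr ⟨h10, List.forall_mem_cons.mpr ⟨h11, List.forall_mem_cons.mpr ⟨h12, List.forall_mem_cons.mpr ⟨h13, List.forall_mem_cons.mpr ⟨h14, List.forall_mem_cons.mpr ⟨h15, List.forall_mem_cons.mpr ⟨h16, List.forall_mem_cons.mpr ⟨h17,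 List.forall_mem_nil _⟩⟩⟩⟩⟩⟩⟩⟩⟩⟩⟩⟩⟩⟩⟩⟩⟩)
    fin_cases hk
    · rw [show belongs "development" n = (["rust-filesystem"] : List String).contains n from rfl,
          contains_false_of_ne n _ (List.forall_mem_cons.mpr ⟨h1, List.forall_mem_nil _⟩)]
      rfl
    · rw [show belongs "git" n = (["github", "gitlab"] : List String).contains n from rfl,
          contains_false_of_ne n _ (List.forall_mem_cons.mpr ⟨h2, List.forall_mem_cons.mpr ⟨h3, List.forall_mem_nil _⟩⟩)]
      rfl
    · rw [show belongs "cloud" n = (["cloud-run", "turso-cloud", "upstash"] : List String).contains n from rfl,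
          contains_false_of_ne n _ (List.forall_mem_cons.mpr ⟨h4, List.forall_mem_cons.mpr ⟨h5, List.forall_mem_cons.mpr ⟨h6, List.forall_mem_nil _⟩⟩⟩)]
      rfl
    · rfl
    · rw [show belongs "monitoring" n = (["sentry", "logfire"] : List String).contains n from rfl,
          contains_false_of_ne n _ (List.forall_mem_cons.mpr ⟨h7, List.forall_mem_cons.mpr ⟨h8, List.forall_mem_nil _⟩⟩)]
      rfl
    · rw [show belongs "design" n = (["excalidraw", "penpot", "mermaid"] : List String).contains n from rfl,
          contains_false_of_ne n _ (List.forall_mem_cons.mpr ⟨h9, List.forall_mem_cons.mpr ⟨h10, List.forall_mem_cons.mpr ⟨h11, List.forall_mem_nil _⟩⟩⟩)]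
      rfl
    · rw [show belongs "testing" n = (["playwright"] : List String).contains n from rfl,
          contains_false_of_ne n _ (List.forall_mem_cons.mpr ⟨h12, List.forall_mem_nil _⟩)]
      rfl
    · rw [show belongs "ai" n = (["memory", "sequential-thinking", "context7"] : List String).contains n from rfl,
          contains_false_of_ne n _ (List.forall_mem_cons.mpr ⟨h13, List.forall_mem_cons.mpr ⟨h14, List.forall_mem_cons.mpr ⟨h15, List.forall_mem_nil _⟩⟩⟩)]
      rfl
    · rw [show belongs "automation" n = (["macos_automator", "peekaboo"] : List String).contains n from rfl,
          contains_false_of_ne n _ (List.forall_mem_cons.mpr ⟨h16, List.forall_mem_cons.mpr ⟨h17, List.forall_mem_nil _⟩⟩)]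
      rfl
    · rw [show belongs "custom" n = !(knownList.contains n) from rfl, hknown]
      rfl

-- A's step function is "modify the bucket the chain selects".
theorem stepA_eq :
    (fun (cats : PySem.Dict String (List String)) (p : String × List (String × String)) =>
      if ["github", "gitlab"].contains p.1 then
        cats.modify "git" [] (fun v => v ++ [p.1])
      else if ["memory", "sequential-thinking", "context7"].contains p.1 then
        cats.modify "ai" [] (fun v => v ++ [p.1])
      else if ["cloud-run", "turso-cloud", "upstash"].contains p.1 then
        cats.modify "cloud" [] (fun v => v ++ [p.1])
      else if ["sentry", "logfire"].contains p.1 then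
        cats.modify "monitoring" [] (fun v => v ++ [p.1])
      else if ["excalidraw", "penpot", "mermaid"].contains p.1 then
        cats.modify "design" [] (fun v => v ++ [p.1])
      else if ["playwright"].contains p.1 then
        cats.modify "testing" [] (fun v => v ++ [p.1])
      else if ["macos_automator", "peekaboo"].contains p.1 then
        cats.modify "automation" [] (fun v => v ++ [p.1])
      else if ["rust-filesystem"].contains p.1 then
        cats.modify "development" [] (fun v => v ++ [p.1])
      else
        cats.modify "custom" [] (fun v => v ++ [p.1]))
    = (fun (cats : PySem.Dict String (List String)) (p : String × List (String × String)) =>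
        cats.modify (chainKey p.1) [] (fun v => v ++ [p.1])) := by
  funext cats p
  unfold chainKey
  split_ifs <;> rfl

theorem chainKey_mem (n : String) : chainKey n ∈ categoryOrder := by
  unfold chainKey
  split_ifs <;> decide

theorem initCats_getD (k : String) : initCats.getD k [] = [] := by
  unfold initCats
  simp only [PySem.Dict.getD_eq_get?_getD, PySem.Dict.get?_mk_cons]
  split_ifs <;> rfl

-- The items of A's final dict, in category order: each bucket collects, in input
-- order, the server names the chain sends to that category.
theorem itemsA (servers : List (String × List (String × String))) :
    (servers.foldl (fun cats p => cats.modify (chainKey p.1) [] (fun v => v ++ [p.1]))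
        (PySem.Dict.mk
          [("development", []), ("git", []), ("cloud", []), ("database", []), ("monitoring", []),
           ("design", []), ("testing", []), ("ai", []), ("automation", []), ("custom", [])])).items
      = categoryOrder.map (fun k => (k, (servers.map (·.1)).filter (fun n => chainKey n == k))) := by
  rw [show (PySem.Dict.mk
    [("development", ([] : List String)), ("git", []), ("cloud", []), ("database", []), ("monitoring", []),
     ("design", []), ("testing", []), ("ai", []), ("automation", []), ("custom", [])]) = initCats from rfl]
  have hfold : (servers.map (fun p : String × List (String × String) => (chainKey p.1, p.1))).foldl
        (fun d q => d.modify q.1 [] (fun v => v ++ [q.2])) initCats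
      = servers.foldl (fun cats p => cats.modify (chainKey p.1) [] (fun v => v ++ [p.1])) initCats := by
    rw [List.foldl_map]
  rw [← hfold]
  have hkeys : ((servers.map (fun p : String × List (String × String) => (chainKey p.1, p.1))).foldl
        (fun d q => d.modify q.1 [] (fun v => v ++ [q.2])) initCats).keys = categoryOrder := by
    rw [PySem.Dict.keys_foldl_modify_key]
    rw [show initCats.keys = categoryOrder from rfl]
    rw [PySem.Set.update_eq_append_filter]
    have hnil : (PySem.Set.ofList ((servers.map (fun p : String × List (String × String) => (chainKey p.1, p.1))).map Prod.fst)).filter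
        (fun y => !(PySem.Set.contains categoryOrder y)) = [] := by
      apply List.filter_eq_nil_iff.mpr
      intro y hy
      have hy' := (PySem.Set.mem_ofList _ _).mp hy
      simp only [List.map_map, List.mem_map] at hy'
      obtain ⟨p, -, rfl⟩ := hy'
      simp [PySem.Set.contains, chainKey_mem]
    rw [hnil, List.append_nil]
  have hnd : ((servers.map (fun p : String × List (String × String) => (chainKey p.1, p.1))).foldl
        (fun d q => d.modify q.1 [] (fun v => v ++ [q.2])) initCats).keys.Nodup := by
    rw [hkeys]; decide
  rw [PySem.Dict.items_eq_map_keys _ hnd [], hkeys]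
  apply List.map_congr_left
  intro k hk
  rw [PySem.Dict.getD_foldl_modify_append, initCats_getD, List.nil_append]
  simp only [List.filter_map, List.map_map, Function.comp_def]

-- ===== VERDICT (by name: the statement is the Claim_ definition above) =====
theorem categorize_servers_spec : Claim_equal_categorize_servers := by
  intro servers _
  unfold Spec_categorize_servers categorize_servers categorize_servers_alt
  dsimp only
  rw [stepA_eq, itemsA]
  congr 1
  apply List.map_congr_left
  intro k hk
  rw [List.filter_congr (fun n _ => chainKey_eq_belongs k hk n)]
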